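-- pv_equiv track=rewrite | github.com/paiml/depyler | examples/hard_prac_fs_bitmap.py | bm_fragmentation
-- ===== SOURCE A (Python) =====
-- def bm_fragmentation(bitmap: list[int], total: int) -> int:
--     """Count number of free fragments (contiguous free runs)."""
--     fragments: int = 0
--     in_free: int = 0
--     i: int = 0
--     while i < total:
--         b: int = bitmap[i]
--         if b == 0:
--             if in_free == 0:
--                 fragments = fragments + 1
--                 in_free = 1
--         else:
--             in_free = 0
--         i = i + 1
--     return fragments
-- ===== SOURCE B (Python) =====
-- def bm_fragmentation(bitmap: list[int], total: int) -> int: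
--     """Count number of free fragments (contiguous free runs)."""
--     # Staged: materialize the scanned prefix, collapse it into one key per
--     # contiguous run (a grouping pass), then count the runs keyed by 0.
--     values = [bitmap[i] for i in range(total)]
--     run_keys = []
--     j = 0
--     n = len(values)
--     while j < n:
--         v = values[j]
--         run_keys.append(v)
--         while j < n and values[j] == v:
--             j += 1
--     return run_keys.count(0)
-- ===== Notes on version B (the rewrite author's own statement) =====
-- stated objective: alternative
-- what changed: Replaces A's single-pass in_free state machine with staged passes: materialize the scanned prefix, collapse consecutive equal values into one key per run with a grouping loop that skips each run, then count the run keys equal to 0.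
import Mathlib
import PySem

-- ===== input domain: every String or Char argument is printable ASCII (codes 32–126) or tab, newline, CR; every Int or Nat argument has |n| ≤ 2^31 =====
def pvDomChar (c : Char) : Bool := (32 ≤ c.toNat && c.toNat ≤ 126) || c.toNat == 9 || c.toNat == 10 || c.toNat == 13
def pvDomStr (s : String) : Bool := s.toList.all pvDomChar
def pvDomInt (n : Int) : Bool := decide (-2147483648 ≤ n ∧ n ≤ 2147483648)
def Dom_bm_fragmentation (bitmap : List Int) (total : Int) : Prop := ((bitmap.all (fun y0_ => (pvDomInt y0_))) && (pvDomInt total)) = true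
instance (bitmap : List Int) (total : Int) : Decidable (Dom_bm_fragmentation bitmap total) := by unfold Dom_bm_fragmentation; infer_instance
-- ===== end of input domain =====

-- B replaces A's in_free state-machine loop with staged passes (materialize, collapse runs to keys, count zero keys); objective: alternative.


-- ===== PORT A =====
-- while i < total with i += 1 iterates i over range(0, total); state = (fragments, in_free).
-- bitmap[i] is pyGetD (total form of xs[i]); Pre_ guarantees the index is in range.
def bm_fragmentation (bitmap : List Int) (total : Int) : Int :=
  let r := (PySem.List.pyRange 0 total 1).foldl
    (fun (st : Int × Int) i =>
      let b := PySem.List.pyGetD bitmap i 0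
      if b = 0 then
        if st.2 = 0 then (st.1 + 1, 1) else st
      else (st.1, 0))
    (0, 0)
  r.1

-- ===== PORT B =====
-- run_keys loop of Source B: append the value at the current position, then the inner while
-- skips the whole run of equal values — structurally, dropWhile of elements equal to v.
def pvRunKeys (l : List Int) : List Int :=
  match l with
  | [] => []
  | v :: rest => v :: pvRunKeys (rest.dropWhile (fun x => x == v))
termination_by l.length
decreasing_by
  simp only [List.length_cons]
  exact Nat.lt_succ_of_le (List.length_dropWhile_le _ _)

def bm_fragmentation_alt (bitmap : List Int) (total : Int) : Int :=
  let values := (PySem.List.pyRange 0 total 1).map (fun i => PySem.List.pyGetD bitmap i 0)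
  (PySem.List.count (pvRunKeys values) 0 : Int)

-- ===== PRECONDITION & SPEC =====
-- Pre_ excludes exactly the inputs where Python raises IndexError: total > len(bitmap) (both A and B raise there).
def Pre_bm_fragmentation (bitmap : List Int) (total : Int) : Prop := total ≤ (bitmap.length : Int)
instance (bitmap : List Int) (total : Int) : Decidable (Pre_bm_fragmentation bitmap total) := by unfold Pre_bm_fragmentation; infer_instance
def pvWitness_bm_fragmentation : List Int × Int := ([0, 1, 0, 0, 2], 5)

def Spec_bm_fragmentation (bitmap : List Int) (total : Int) (out : Int) : Prop := out = bm_fragmentation_alt bitmap total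
instance (bitmap : List Int) (total : Int) (out : Int) : Decidable (Spec_bm_fragmentation bitmap total out) := by unfold Spec_bm_fragmentation; infer_instance

-- ===== CLAIM (what is proved, stated in full; the proofs are below) =====
def Claim_equal_bm_fragmentation : Prop := ∀ (bitmap : List Int) (total : Int), Dom_bm_fragmentation bitmap total → Pre_bm_fragmentation bitmap total → Spec_bm_fragmentation bitmap total (bm_fragmentation bitmap total)

-- ===== LEMMAS AND PROOFS =====

-- A's loop body as a function of the current value.
def pvStep (st : Int × Int) (b : Int) : Int × Int :=
  if b = 0 then
    if st.2 = 0 then (st.1 + 1, 1) else st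
  else (st.1, 0)

-- Elements fixed by the current state can be dropped from the front of the fold.
theorem pv_foldl_dropWhile (l : List Int) (st : Int × Int) (v : Int)
    (h : pvStep st v = st) :
    l.foldl pvStep st = (l.dropWhile (fun x => x == v)).foldl pvStep st := by
  induction l with
  | nil => rfl
  | cons x xs ih =>
    by_cases hx : x = v
    · subst hx
      simp only [List.dropWhile_cons, beq_self_eq_true, if_pos, List.foldl_cons, h]
      exact ih
    · simp [List.dropWhile_cons, hx]

-- The head of dropWhile (· == 0) is nonzero (when it exists).
theorem pv_head_dropWhile_ne (l : List Int) :
    ∀ w ds, l.dropWhile (fun x => x == (0 : Int)) = w :: ds → w ≠ 0 := by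
  induction l with
  | nil => intro w ds h; cases h
  | cons x xs ih =>
    intro w ds h
    by_cases hx : x = (0 : Int)
    · subst hx
      simp only [List.dropWhile_cons, beq_self_eq_true, if_pos] at h
      exact ih w ds h
    · simp only [List.dropWhile_cons, beq_iff_eq, hx, if_false] at h
      cases h
      exact hx

-- With a nonzero head (or empty list), the in_free flag does not matter.
theorem pv_flag_irrelevant (ds : List Int) (c : Int)
    (h : ∀ w t, ds = w :: t → w ≠ 0) :
    (ds.foldl pvStep (c, 1)).1 = (ds.foldl pvStep (c, 0)).1 := by
  cases ds with
  | nil => rfl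
  | cons w t =>
    have hw : w ≠ 0 := h w t rfl
    simp [List.foldl_cons, pvStep, hw]

-- Main invariant: A's state machine counts exactly the zero run-keys of the value list.
theorem pv_main : ∀ (N : Nat) (l : List Int) (c : Int), l.length ≤ N →
    (l.foldl pvStep (c, 0)).1 = c + (List.count 0 (pvRunKeys l) : Int) := by
  intro N
  induction N with
  | zero =>
    intro l c hl
    have : l = [] := List.eq_nil_of_length_eq_zero (Nat.le_zero.mp hl)
    subst this
    simp [pvRunKeys]
  | succ N ih =>
    intro l c hl
    cases l with
    | nil => simp [pvRunKeys]
    | cons v rest =>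
      simp only [List.length_cons, Nat.succ_le_succ_iff] at hl
      by_cases hv : v = 0
      · subst hv
        have h1 : pvStep (c, 0) 0 = (c + 1, 1) := by simp [pvStep]
        rw [List.foldl_cons, h1]
        set ds := rest.dropWhile (fun x => x == (0 : Int)) with hds
        have hfix : pvStep (c + 1, 1) 0 = (c + 1, 1) := by simp [pvStep]
        rw [pv_foldl_dropWhile rest (c + 1, 1) 0 hfix, ← hds]
        rw [pv_flag_irrelevant ds (c + 1) (fun w t hw => pv_head_dropWhile_ne rest w t (hds ▸ hw))]
        have hlen : ds.length ≤ N :=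
          le_trans (List.length_dropWhile_le _ _) hl
        rw [ih ds (c + 1) hlen]
        rw [pvRunKeys]
        simp only [List.count_cons, beq_self_eq_true, if_pos, ← hds]
        push_cast
        ring
      · have h1 : pvStep (c, 0) v = (c, 0) := by simp [pvStep, hv]
        rw [List.foldl_cons, h1]
        set ds := rest.dropWhile (fun x => x == v) with hds
        rw [pv_foldl_dropWhile rest (c, 0) v h1, ← hds]
        have hlen : ds.length ≤ N :=
          le_trans (List.length_dropWhile_le _ _) hl
        rw [ih ds c hlen]
        rw [pvRunKeys]
        simp only [List.count_cons, ← hds]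
        rw [if_neg (by simpa using hv)]
        simp

-- ===== VERDICT (by name: the statement is the Claim_ definition above) =====
theorem bm_fragmentation_spec : Claim_equal_bm_fragmentation := by
  intro bitmap total _ _
  unfold Spec_bm_fragmentation bm_fragmentation bm_fragmentation_alt
  dsimp only
  rw [PySem.List.count_eq]
  set values := (PySem.List.pyRange 0 total 1).map (fun i => PySem.List.pyGetD bitmap i 0) with hv
  have hfold : (PySem.List.pyRange 0 total 1).foldl
      (fun (st : Int × Int) i =>
        let b := PySem.List.pyGetD bitmap i 0
        if b = 0 then
          if st.2 = 0 then (st.1 + 1, 1) else st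
        else (st.1, 0))
      (0, 0) = values.foldl pvStep (0, 0) := by
    rw [hv, List.foldl_map]
    rfl
  simp only [hfold]
  have := pv_main values.length values 0 le_rfl
  simpa using this
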